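-- pv_equiv track=rewrite | github.com/HCIS-Lab/Affordance-Guided-Self-Consistent-MLLM | src/affordance/ours/agent.py | spoon_on_hand
-- ===== SOURCE A (Python) =====
-- def spoon_on_hand(action_seq):
--     """assume the robot has no spoon at the beginning"""
--     grasped = False
--     for action in action_seq:
--         if action == 'grasp_spoon':
--             grasped = True
--         elif action == 'put_spoon_back':
--             grasped = False
--     return grasped
-- ===== SOURCE B (Python) =====
-- def spoon_on_hand(action_seq):
--     """assume the robot has no spoon at the beginning"""
--     for action in reversed(action_seq):
--         if action == 'grasp_spoon':
--             return True
--         if action == 'put_spoon_back':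
--             return False
--     return False
-- ===== Notes on version B (the rewrite author's own statement) =====
-- stated objective: simpler
-- what changed: Replaces the forward fold over a mutated flag with an early-exit reverse scan that returns on the last decisive action ('grasp_spoon' -> True, 'put_spoon_back' -> False), defaulting to False.
import Mathlib
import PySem

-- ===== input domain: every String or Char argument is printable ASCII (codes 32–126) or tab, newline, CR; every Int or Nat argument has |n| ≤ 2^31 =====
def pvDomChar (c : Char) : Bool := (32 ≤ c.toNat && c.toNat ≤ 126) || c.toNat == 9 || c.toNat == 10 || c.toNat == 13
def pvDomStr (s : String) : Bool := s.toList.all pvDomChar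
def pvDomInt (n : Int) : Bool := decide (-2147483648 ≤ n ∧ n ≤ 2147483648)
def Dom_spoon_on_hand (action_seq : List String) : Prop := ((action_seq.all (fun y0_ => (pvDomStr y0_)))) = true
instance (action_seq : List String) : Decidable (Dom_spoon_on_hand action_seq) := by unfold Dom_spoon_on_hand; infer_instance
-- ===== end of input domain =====

-- B replaces A's forward fold over a mutated flag with an early-exit reverse scan (simpler).

-- ===== PORT A =====
def spoon_on_hand (action_seq : List String) : Bool :=
  action_seq.foldl
    (fun grasped action =>
      if action == "grasp_spoon" then true
      else if action == "put_spoon_back" then false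
      else grasped)
    false

-- ===== PORT B =====
-- early-exit loop over the reversed list
def spoonRevScan : List String → Bool
  | [] => false
  | action :: rest =>
      if action == "grasp_spoon" then true
      else if action == "put_spoon_back" then false
      else spoonRevScan rest

def spoon_on_hand_alt (action_seq : List String) : Bool :=
  spoonRevScan action_seq.reverse

-- ===== PRECONDITION & SPEC =====
def Spec_spoon_on_hand (action_seq : List String) (out : Bool) : Prop := out = spoon_on_hand_alt action_seq
instance (action_seq : List String) (out : Bool) : Decidable (Spec_spoon_on_hand action_seq out) := by unfold Spec_spoon_on_hand; infer_instance

-- ===== CLAIM (what is proved, stated in full; the proofs are below) =====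
def Claim_equal_spoon_on_hand : Prop := ∀ (action_seq : List String), Dom_spoon_on_hand action_seq → Spec_spoon_on_hand action_seq (spoon_on_hand action_seq)

-- ===== LEMMAS AND PROOFS =====
theorem spoon_fold_eq_revScan (xs : List String) :
    spoon_on_hand xs = spoonRevScan xs.reverse := by
  induction xs using List.reverseRecOn with
  | nil => rfl
  | append_singleton xs a ih =>
      simp only [spoon_on_hand, List.foldl_append, List.foldl_cons, List.foldl_nil,
        List.reverse_append, List.reverse_singleton, List.singleton_append, spoonRevScan]
      by_cases h1 : a = "grasp_spoon"
      · simp [h1]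
      · by_cases h2 : a = "put_spoon_back"
        · simp [h1, h2]
        · simpa [h1, h2, spoon_on_hand] using ih

-- ===== VERDICT (by name: the statement is the Claim_ definition above) =====
theorem spoon_on_hand_spec : Claim_equal_spoon_on_hand := by
  intro xs _
  unfold Spec_spoon_on_hand spoon_on_hand_alt
  exact spoon_fold_eq_revScan xs
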